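-- pv_equiv track=rewrite | github.com/maxbarsukov/csa3-stack-machine | src/translator/data_translator.py | str2list_int
-- ===== SOURCE A (Python) =====
-- def str2list_int(data: str) -> tuple[list[list[int]], list[int]]:
--     in_quotes: bool = False
--
--     # Массив, в котором хранятся индексы элементов, взятых в кавычки (включая кавычки)
--     # Нужен, чтобы после первого прохода по данным в метке, очистить данные от строк
--     ind_chars_in_quotes: list[int] = []
--
--     # Массив, в котором на i-ой позиции пустой массив, если на i-ой позиции в data
--     # был одиночный байт или резервация, иначе там была строка и этот массив
--     # -- последовательность байт строки
--     list_codes: list[list[int]] = [[]]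
--
--     for index, x in enumerate(data):
--         if x == '"':
--             in_quotes = not in_quotes
--             ind_chars_in_quotes.append(index)
--         elif in_quotes:
--             list_codes[-1].append(ord(x))
--             ind_chars_in_quotes.append(index)
--         elif x == ",":
--             list_codes.append([])
--
--     # Вставляем длину строки в начало (у нас Pascal Strings)
--     for lst in list_codes:
--         if lst:
--             lst.insert(0, len(lst))
--
--     return list_codes, ind_chars_in_quotes
-- ===== SOURCE B (Python) =====
-- def str2list_int(data: str) -> tuple[list[list[int]], list[int]]:
--     # Split on the quote characters: even-indexed parts lie outside quotes,
--     # odd-indexed parts are quoted string contents; each part i>0 is preceded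
--     # by one quote character.
--     parts = data.split('"')
--     fields: list[list[int]] = [[]]
--     inds: list[int] = []
--     pos = 0
--     for i, part in enumerate(parts):
--         if i > 0:
--             inds.append(pos)          # the quote character before this part
--             pos += 1
--         if i % 2 == 0:
--             # outside quotes: only the commas matter, one new field per comma
--             fields.extend([] for _ in range(part.count(',')))
--         else:
--             # inside quotes: the bytes join the current field, indices recorded
--             fields[-1] = fields[-1] + [ord(c) for c in part]
--             inds.extend(range(pos, pos + len(part)))
--         pos += len(part)
--     return [[len(f)] + f if f else [] for f in fields], inds
-- ===== Notes on version B (the rewrite author's own statement) =====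
-- stated objective: faster
-- what changed: B first splits the input on quote characters and processes whole alternating segments (even = outside quotes: count commas; odd = quoted content: bulk-append bytes and an index range), with no in_quotes flag and no per-character Python-level enumeration, instead of A's char-by-char state-machine scan plus a second length-inserting pass.
import Mathlib
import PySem

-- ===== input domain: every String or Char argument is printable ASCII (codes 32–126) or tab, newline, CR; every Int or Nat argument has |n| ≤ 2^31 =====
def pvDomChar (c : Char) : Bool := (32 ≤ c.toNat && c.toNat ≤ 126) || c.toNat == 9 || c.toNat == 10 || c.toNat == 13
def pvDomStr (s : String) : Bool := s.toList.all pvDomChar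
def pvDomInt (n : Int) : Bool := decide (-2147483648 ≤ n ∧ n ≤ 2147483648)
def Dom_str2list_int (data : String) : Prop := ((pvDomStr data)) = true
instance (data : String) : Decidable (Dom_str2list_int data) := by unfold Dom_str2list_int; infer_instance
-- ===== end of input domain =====

-- B splits the input on quote characters and processes whole alternating segments
-- (outside: count commas; inside: bulk-append bytes and an index range) instead of
-- A's char-by-char in_quotes state machine plus a second length-inserting pass.

-- ===== PORT A =====
-- list_codes[-1].append(v): append v to the last element (list always nonempty in A)
def pvAppendLast (codes : List (List Int)) (v : Int) : List (List Int) :=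
  match codes with
  | [] => []
  | [l] => [l ++ [v]]
  | l :: rest => l :: pvAppendLast rest v

-- one iteration of A's for-loop; state = (in_quotes, list_codes, ind_chars_in_quotes)
def pvStepA (st : Bool × List (List Int) × List Int) (p : Int × Char) :
    Bool × List (List Int) × List Int :=
  let q := st.1; let codes := st.2.1; let inds := st.2.2
  if p.2 = '"' then (!q, codes, inds ++ [p.1])
  else if q then (q, pvAppendLast codes (Int.ofNat p.2.toNat), inds ++ [p.1])
  else if p.2 = ',' then (q, codes ++ [[]], inds)
  else st

def str2list_int (data : String) : List (List Int) × List Int :=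
  let st := (PySem.List.enumerate data.toList).foldl pvStepA (false, [[]], [])
  -- second pass: lst.insert(0, len(lst)) for nonempty lst
  (st.2.1.map (fun l => if l = [] then l else (l.length : Int) :: l), st.2.2)

-- ===== PORT B =====
-- fields[-1] = fields[-1] + xs : extend the last element in place
def pvExtendLast (fields : List (List Int)) (xs : List Int) : List (List Int) :=
  match fields with
  | [] => []
  | [l] => [l ++ xs]
  | l :: rest => l :: pvExtendLast rest xs

-- one iteration of B's loop over enumerate(parts); state = (fields, inds, pos)
def pvStepB (st : List (List Int) × List Int × Int) (p : Int × List Char) :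
    List (List Int) × List Int × Int :=
  let fields := st.1
  let inds := if 0 < p.1 then st.2.1 ++ [st.2.2] else st.2.1
  let pos := if 0 < p.1 then st.2.2 + 1 else st.2.2
  if PySem.Int.mod p.1 2 = 0 then
    (fields ++ List.replicate (PySem.Chars.count p.2 [',']) [], inds, pos + p.2.length)
  else
    (pvExtendLast fields (p.2.map (fun c => (c.toNat : Int))),
     inds ++ (List.range p.2.length).map (fun (k : Nat) => pos + (k : Int)), pos + p.2.length)

def str2list_int_alt (data : String) : List (List Int) × List Int :=
  let parts := PySem.Chars.splitOn data.toList ['"']   -- data.split('"'), on code points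
  let st := (PySem.List.enumerate parts).foldl pvStepB ([[]], [], 0)
  -- [[len(f)] + f if f else [] for f in fields]
  (st.1.map (fun f => if f = [] then [] else (f.length : Int) :: f), st.2.1)

-- ===== PRECONDITION & SPEC =====
def Spec_str2list_int (data : String) (out : List (List Int) × List Int) : Prop := out = str2list_int_alt data
instance (data : String) (out : List (List Int) × List Int) : Decidable (Spec_str2list_int data out) := by unfold Spec_str2list_int; infer_instance

-- ===== CLAIM (what is proved, stated in full; the proofs are below) =====
def Claim_equal_str2list_int : Prop := ∀ (data : String), Dom_str2list_int data → Spec_str2list_int data (str2list_int data)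

-- ===== LEMMAS AND PROOFS =====

-- forward-direction specification of split-on-'"'
def pvSplit (pre : List Char) : List Char → List (List Char)
  | [] => [pre]
  | c :: t => if c = '"' then pre :: pvSplit [] t else pvSplit (pre ++ [c]) t

theorem pvSplitOn_go_spec (fuel : Nat) :
    ∀ (l cur : List Char) (acc : List (List Char)), l.length ≤ fuel →
      PySem.Chars.splitOn.go ['"'] fuel l cur acc = acc.reverse ++ pvSplit cur.reverse l := by
  induction fuel with
  | zero =>
      intro l cur acc h
      have : l = [] := by cases l <;> simp_all
      subst this
      simp [PySem.Chars.splitOn.go, pvSplit]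
  | succ fuel ih =>
      intro l cur acc h
      cases l with
      | nil => simp [PySem.Chars.splitOn.go, pvSplit]
      | cons c rest =>
          by_cases hc : c = '"'
          · subst hc
            have : PySem.Chars.splitOn.go ['"'] (fuel + 1) ('"' :: rest) cur acc =
                PySem.Chars.splitOn.go ['"'] fuel rest [] (cur.reverse :: acc) := by
              simp [PySem.Chars.splitOn.go, List.isPrefixOf]
            rw [this, ih rest [] (cur.reverse :: acc) (by simpa using Nat.lt_succ_iff.mp (by simpa using h))]
            simp [pvSplit]
          · have : PySem.Chars.splitOn.go ['"'] (fuel + 1) (c :: rest) cur acc =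
                PySem.Chars.splitOn.go ['"'] fuel rest (c :: cur) acc := by
              simp [PySem.Chars.splitOn.go, List.isPrefixOf, Ne.symm hc]
            rw [this, ih rest (c :: cur) acc (by simpa using Nat.lt_succ_iff.mp (by simpa using h))]
            simp [pvSplit, hc]

theorem pvSplitOn_eq (l : List Char) :
    PySem.Chars.splitOn l ['"'] = pvSplit [] l := by
  have := pvSplitOn_go_spec (l.length + 1) l [] [] (by omega)
  simpa [PySem.Chars.splitOn] using this

theorem pvCount_go_spec (fuel : Nat) :
    ∀ (l : List Char) (acc : Nat), l.length ≤ fuel →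
      PySem.Chars.count.go [','] fuel l acc = acc + l.count ',' := by
  induction fuel with
  | zero =>
      intro l acc h
      have : l = [] := by cases l <;> simp_all
      subst this; simp [PySem.Chars.count.go]
  | succ fuel ih =>
      intro l acc h
      cases l with
      | nil => simp [PySem.Chars.count.go]
      | cons c rest =>
          by_cases hc : c = ','
          · subst hc
            have : PySem.Chars.count.go [','] (fuel + 1) (',' :: rest) acc =
                PySem.Chars.count.go [','] fuel rest (acc + 1) := by
              simp [PySem.Chars.count.go, List.isPrefixOf]
            rw [this, ih rest (acc + 1) (by simpa using Nat.lt_succ_iff.mp (by simpa using h))]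
            simp; omega
          · have : PySem.Chars.count.go [','] (fuel + 1) (c :: rest) acc =
                PySem.Chars.count.go [','] fuel rest acc := by
              simp [PySem.Chars.count.go, List.isPrefixOf, Ne.symm hc]
            rw [this, ih rest acc (by simpa using Nat.lt_succ_iff.mp (by simpa using h))]
            simp [hc]

theorem pvCount_comma (l : List Char) :
    PySem.Chars.count l [','] = l.count ',' := by
  simpa [PySem.Chars.count] using pvCount_go_spec l.length l 0 (le_refl _)

-- pvSplit never returns the empty list
theorem pvSplit_ne_nil (l : List Char) : ∀ pre, pvSplit pre l ≠ [] := by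
  induction l with
  | nil => intro pre; simp [pvSplit]
  | cons c t ih => intro pre; by_cases hc : c = '"' <;> simp [pvSplit, hc, ih]

-- reconstruction: the input is the head part followed by '"'-prefixed tail parts
theorem pvSplit_join (l : List Char) : ∀ pre h t, pvSplit pre l = h :: t →
    h ++ (t.map (fun s => '"' :: s)).flatten = pre ++ l := by
  induction l with
  | nil => intro pre h t he; simp [pvSplit] at he; simp [he.1, he.2]
  | cons c rest ih =>
      intro pre h t he
      by_cases hc : c = '"'
      · subst hc
        simp [pvSplit] at he
        obtain ⟨h2, t2, he2⟩ := List.exists_cons_of_ne_nil (pvSplit_ne_nil rest [])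
        rw [he2] at he
        have := ih [] h2 t2 he2
        simp at this
        rw [← he.1, ← he.2]
        simp [this]
      · simp [pvSplit, hc] at he
        have := ih (pre ++ [c]) h t he
        simpa using this

-- every produced part is quote-free
theorem pvSplit_no_quote (l : List Char) : ∀ pre, '"' ∉ pre →
    ∀ p ∈ pvSplit pre l, '"' ∉ p := by
  induction l with
  | nil => intro pre hp p hm; simp [pvSplit] at hm; subst hm; exact hp
  | cons c rest ih =>
      intro pre hp p hm
      by_cases hc : c = '"'
      · subst hc
        simp [pvSplit] at hm
        rcases hm with hm | hm
        · subst hm; exact hp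
        · exact ih [] (by simp) p hm
      · simp [pvSplit, hc] at hm
        exact ih (pre ++ [c]) (by simp [hp, Ne.symm hc]) p hm

theorem pvAppendLast_eq_extend (F : List (List Int)) (v : Int) :
    pvAppendLast F v = pvExtendLast F [v] := by
  induction F with
  | nil => rfl
  | cons a t ih => cases t <;> simp_all [pvAppendLast, pvExtendLast]

theorem pvExtendLast_ne_nil (F : List (List Int)) (xs : List Int) (h : F ≠ []) :
    pvExtendLast F xs ≠ [] := by
  cases F with
  | nil => simp at h
  | cons a t => cases t <;> simp [pvExtendLast]

theorem pvExtendLast_cons_of_ne (a : List Int) (t : List (List Int)) (xs : List Int)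
    (h : t ≠ []) : pvExtendLast (a :: t) xs = a :: pvExtendLast t xs := by
  cases t with
  | nil => simp at h
  | cons b u => rfl

theorem pvExtendLast_extend (F : List (List Int)) (xs ys : List Int) :
    pvExtendLast (pvExtendLast F xs) ys = pvExtendLast F (xs ++ ys) := by
  induction F with
  | nil => rfl
  | cons a t ih =>
      cases t with
      | nil => simp [pvExtendLast]
      | cons b u =>
          rw [pvExtendLast_cons_of_ne a (b :: u) xs (by simp),
              pvExtendLast_cons_of_ne a (pvExtendLast (b :: u) xs) ys
                (pvExtendLast_ne_nil _ _ (by simp)),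
              pvExtendLast_cons_of_ne a (b :: u) (xs ++ ys) (by simp), ih]

theorem pvExtendLast_nil (F : List (List Int)) : pvExtendLast F [] = F := by
  induction F with
  | nil => rfl
  | cons a t ih => cases t <;> simp_all [pvExtendLast]

-- A's loop over a quote-free segment, outside quotes: one [] per comma, indices untouched
theorem pvA_outside (seg : List Char) : ∀ (_ : '"' ∉ seg) (pos : Int)
    (F : List (List Int)) (inds : List Int),
    (PySem.List.enumerate seg pos).foldl pvStepA (false, F, inds)
      = (false, F ++ List.replicate (seg.count ',') [], inds) := by
  induction seg with
  | nil => intro _ pos F inds; simp [PySem.List.enumerate]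
  | cons c t ih =>
      intro h pos F inds
      rw [List.mem_cons, not_or] at h
      have hc : c ≠ '"' := fun he => h.1 he.symm
      rw [PySem.List.enumerate_cons, List.foldl_cons]
      by_cases hcm : c = ','
      · subst hcm
        have : pvStepA (false, F, inds) (pos, ',') = (false, F ++ [[]], inds) := by
          simp [pvStepA]
        rw [this, ih h.2 (pos + 1)]
        simp [List.replicate_succ']
        rw [← List.replicate_succ, List.replicate_succ']
      · have : pvStepA (false, F, inds) (pos, c) = (false, F, inds) := by
          simp [pvStepA, hc, hcm]
        rw [this, ih h.2 (pos + 1)]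
        simp [hcm]

theorem pvRangeMap (pos : Int) (n : Nat) :
    (List.range (n + 1)).map (fun (k : Nat) => pos + (k : Int))
      = pos :: (List.range n).map (fun (k : Nat) => (pos + 1) + (k : Int)) := by
  rw [List.range_succ_eq_map, List.map_cons, List.map_map]
  simp only [Nat.cast_zero, add_zero]
  refine congrArg _ (List.map_congr_left ?_)
  intro k _
  simp [Function.comp]
  ring

-- A's loop over a quote-free segment, inside quotes: bytes extend the last field,
-- the consecutive indices are appended
theorem pvA_inside (seg : List Char) : ∀ (_ : '"' ∉ seg) (pos : Int)
    (F : List (List Int)) (inds : List Int),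
    (PySem.List.enumerate seg pos).foldl pvStepA (true, F, inds)
      = (true, pvExtendLast F (seg.map (fun c => (c.toNat : Int))),
         inds ++ (List.range seg.length).map (fun (k : Nat) => pos + (k : Int))) := by
  induction seg with
  | nil => intro _ pos F inds; simp [PySem.List.enumerate, pvExtendLast_nil]
  | cons c t ih =>
      intro h pos F inds
      rw [List.mem_cons, not_or] at h
      have hc : c ≠ '"' := fun he => h.1 he.symm
      rw [PySem.List.enumerate_cons, List.foldl_cons]
      have : pvStepA (true, F, inds) (pos, c)
          = (true, pvExtendLast F [(c.toNat : Int)], inds ++ [pos]) := by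
        simp [pvStepA, hc, pvAppendLast_eq_extend, Int.ofNat_eq_natCast]
      rw [this, ih h.2 (pos + 1)]
      refine Prod.ext rfl (Prod.ext ?_ ?_)
      · simp [pvExtendLast_extend]
      · rw [List.length_cons, pvRangeMap]
        simp

-- main correspondence on the tail parts: B's one step per part equals A's fold
-- over the quote and the part's characters
theorem pv_tail (ts : List (List Char)) : (∀ t ∈ ts, '"' ∉ t) →
    ∀ (k : Nat) (pos : Int) (F : List (List Int)) (inds : List Int),
    ∃ F' inds' pos',
      (PySem.List.enumerate ts ((k : Int) + 1)).foldl pvStepB (F, inds, pos) = (F', inds', pos') ∧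
      (PySem.List.enumerate ((ts.map (fun t => '"' :: t)).flatten) pos).foldl pvStepA
          (decide (k % 2 = 1), F, inds)
        = (decide ((k + ts.length) % 2 = 1), F', inds') := by
  induction ts with
  | nil =>
      intro _ k pos F inds
      exact ⟨F, inds, pos, by simp [PySem.List.enumerate], by simp⟩
  | cons t ts' ih =>
      intro hq k pos F inds
      have hqt : '"' ∉ t := hq t (by simp)
      have hqts : ∀ u ∈ ts', '"' ∉ u := fun u hu => hq u (by simp [hu])
      rw [PySem.List.enumerate_cons, List.foldl_cons]
      have hpos : (0 : Int) < (k : Int) + 1 := by positivity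
      have hmod : PySem.Int.mod ((k : Int) + 1) 2 = (((k + 1) % 2 : Nat) : Int) := by
        have hcast : (k : Int) + 1 = ((k + 1 : Nat) : Int) := by push_cast; ring
        rw [hcast]; exact_mod_cast PySem.Int.mod_natCast (k + 1) 2
      have hflat : ((t :: ts').map (fun t => '"' :: t)).flatten
          = ('"' :: t) ++ (ts'.map (fun t => '"' :: t)).flatten := by simp
      rw [hflat, PySem.List.enumerate_append, List.foldl_append,
          PySem.List.enumerate_cons, List.foldl_cons]
      have hqstep : pvStepA (decide (k % 2 = 1), F, inds) (pos, '"')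
          = (!decide (k % 2 = 1), F, inds ++ [pos]) := by simp [pvStepA]
      rw [hqstep]
      have hstart : (k : Int) + 1 + 1 = ((k + 1 : Nat) : Int) + 1 := by push_cast; ring
      have hstartA : pos + (('"' :: t).length : Int) = pos + 1 + (t.length : Int) := by
        simp; ring
      by_cases he : (k + 1) % 2 = 0
      · -- even part index: outside quotes
        have hk1 : k % 2 = 1 := by omega
        have hstepB : pvStepB (F, inds, pos) ((k : Int) + 1, t)
            = (F ++ List.replicate (t.count ',') [], inds ++ [pos], pos + 1 + (t.length : Int)) := by
          simp only [pvStepB, hmod, he, Nat.cast_zero]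
          simp [hpos, pvCount_comma]
        have hnq : (!decide (k % 2 = 1)) = false := by simp [hk1]
        rw [hstepB, hnq, pvA_outside t hqt (pos + 1) F (inds ++ [pos])]
        obtain ⟨F', inds', pos', hB, hA⟩ :=
          ih hqts (k + 1) (pos + 1 + (t.length : Int)) (F ++ List.replicate (t.count ',') [])
            (inds ++ [pos])
        refine ⟨F', inds', pos', ?_, ?_⟩
        · rw [hstart]; exact hB
        · rw [hstartA]
          have hst : (false : Bool) = decide ((k + 1) % 2 = 1) := by simp [he]
          rw [hst, hA]
          have harith : k + 1 + ts'.length = k + (t :: ts').length := by simp; omega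
          rw [harith]
      · -- odd part index: inside quotes
        have hk0 : k % 2 = 0 := by omega
        have he1 : (k + 1) % 2 = 1 := by omega
        have hstepB : pvStepB (F, inds, pos) ((k : Int) + 1, t)
            = (pvExtendLast F (t.map (fun c => (c.toNat : Int))),
               (inds ++ [pos]) ++ (List.range t.length).map (fun (j : Nat) => (pos + 1) + (j : Int)),
               pos + 1 + (t.length : Int)) := by
          simp only [pvStepB, hmod, he1, Nat.cast_one]
          simp [hpos]
        have hnq : (!decide (k % 2 = 1)) = true := by simp [hk0]
        rw [hstepB, hnq, pvA_inside t hqt (pos + 1) F (inds ++ [pos])]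
        obtain ⟨F', inds', pos', hB, hA⟩ :=
          ih hqts (k + 1) (pos + 1 + (t.length : Int))
            (pvExtendLast F (t.map (fun c => (c.toNat : Int))))
            ((inds ++ [pos]) ++ (List.range t.length).map (fun (j : Nat) => (pos + 1) + (j : Int)))
        refine ⟨F', inds', pos', ?_, ?_⟩
        · rw [hstart]; exact hB
        · rw [hstartA]
          have hst : (true : Bool) = decide ((k + 1) % 2 = 1) := by simp [he1]
          rw [hst, hA]
          have harith : k + 1 + ts'.length = k + (t :: ts').length := by simp; omega
          rw [harith]

-- ===== VERDICT (by name: the statement is the Claim_ definition above) =====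
theorem str2list_int_spec : Claim_equal_str2list_int := by
  intro data _
  unfold Spec_str2list_int str2list_int str2list_int_alt
  obtain ⟨p0, ts, hsplit⟩ := List.exists_cons_of_ne_nil (pvSplit_ne_nil data.toList [])
  have hjoin := pvSplit_join data.toList [] p0 ts hsplit
  have hnqall : ∀ p ∈ pvSplit [] data.toList, '"' ∉ p :=
    pvSplit_no_quote data.toList [] (by simp)
  have hp0 : '"' ∉ p0 := hnqall p0 (by rw [hsplit]; simp)
  have hts : ∀ u ∈ ts, '"' ∉ u := fun u hu => hnqall u (by rw [hsplit]; simp [hu])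
  have hdata : data.toList = p0 ++ (ts.map (fun s => '"' :: s)).flatten := by
    simpa using hjoin.symm
  rw [pvSplitOn_eq, hsplit, hdata]
  dsimp only
  rw [PySem.List.enumerate_append, List.foldl_append,
      PySem.List.enumerate_cons, List.foldl_cons,
      pvA_outside p0 hp0 0 [[]] []]
  have hstepB0 : pvStepB ([[]], [], 0) (0, p0)
      = ([[]] ++ List.replicate (p0.count ',') [], [], 0 + (p0.length : Int)) := by
    simp [pvStepB, pvCount_comma]
  rw [hstepB0]
  obtain ⟨F', inds', pos', hB, hA⟩ :=
    pv_tail ts hts 0 (0 + (p0.length : Int)) ([[]] ++ List.replicate (p0.count ',') []) []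
  have h01 : ((0 : Nat) : Int) + 1 = (0 : Int) + 1 := by norm_num
  rw [h01] at hB
  have h0d : (decide ((0 : Nat) % 2 = 1)) = false := by decide
  rw [h0d] at hA
  rw [hB, hA]
  have hfun : (fun l : List Int => if l = [] then l else (l.length : Int) :: l)
      = (fun f : List Int => if f = [] then [] else (f.length : Int) :: f) := by
    funext l
    by_cases h : l = [] <;> simp [h]
  rw [hfun]
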